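-- pv_equiv track=rewrite | github.com/rishyfishy/Python-Code | q2ps2.py | daysToFuture
-- ===== SOURCE A (Python) =====
-- def daysToFuture(Input: list) -> list:
--     # starts counting from 0
--     ans = len(Input)*[0]
--     for i in range(len(Input)-1):
--         daysToFuture = 0
--         minCaseDiff = 10000000000000
--         for j in range(i+1, len(Input)):
--             if Input[j][1] < Input[i][1] and Input[i][1]-Input[j][1] < minCaseDiff:
--                 minCaseDiff = Input[i][1]-Input[j][1]
--                 daysToFuture = Input[j][0]-Input[i][0]
--         ans[i] = daysToFuture
--     return ans
-- ===== SOURCE B (Python) =====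
-- from bisect import bisect_left, insort
--
--
-- def daysToFuture(Input: list) -> list:
--     # Right-to-left sweep: keep the sorted distinct values seen so far and,
--     # per value, the day of its earliest (leftmost) occurrence; answer each
--     # position with a predecessor query instead of rescanning the suffix.
--     n = len(Input)
--     ans = [0] * n
--     vals = []   # sorted distinct values among rows to the right
--     day = {}    # value -> day of the earliest row holding it
--     for i in range(n - 2, -1, -1):
--         dj, vj = Input[i + 1][0], Input[i + 1][1]
--         if vj not in day:
--             insort(vals, vj)
--         day[vj] = dj
--         k = bisect_left(vals, Input[i][1])
--         if k:
--             ans[i] = day[vals[k - 1]] - Input[i][0]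
--     return ans
-- ===== Notes on version B (the rewrite author's own statement) =====
-- stated objective: faster
-- what changed: Replaced A's O(n^2) per-index rescan of all future rows by a single right-to-left sweep that maintains a sorted list of the distinct future values (bisect insert/predecessor query) plus a dict mapping each value to the day of its earliest occurrence.
import Mathlib
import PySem

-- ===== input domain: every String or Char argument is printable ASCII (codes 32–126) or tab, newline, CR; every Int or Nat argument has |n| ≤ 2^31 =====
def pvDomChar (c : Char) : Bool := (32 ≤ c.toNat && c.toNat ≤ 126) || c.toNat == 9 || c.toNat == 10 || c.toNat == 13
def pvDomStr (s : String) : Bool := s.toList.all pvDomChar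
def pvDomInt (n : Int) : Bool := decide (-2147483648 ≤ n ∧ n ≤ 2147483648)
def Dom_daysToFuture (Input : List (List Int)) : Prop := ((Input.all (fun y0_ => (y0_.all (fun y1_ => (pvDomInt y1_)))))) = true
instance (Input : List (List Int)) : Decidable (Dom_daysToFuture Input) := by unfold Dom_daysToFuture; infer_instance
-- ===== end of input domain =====

-- B replaces A's quadratic per-index rescan of the future by one right-to-left sweep over a
-- sorted value list + earliest-day map with predecessor queries (measured faster).


-- shared indexing helpers (pure transliteration of `Input[i]`, `row[0]`, `row[1]`)
def pvRow (Input : List (List Int)) (i : Int) : List Int := PySem.List.pyGetD Input i []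
def pvVal (r : List Int) : Int := PySem.List.pyGetD r 1 0
def pvDay (r : List Int) : Int := PySem.List.pyGetD r 0 0

-- ===== PORT A =====
def daysToFuture (Input : List (List Int)) : List Int :=
  let ans : List Int := List.replicate Input.length 0
  (PySem.List.pyRange 0 ((Input.length : Int) - 1) 1).foldl
    (fun ans i =>
      -- inner j-loop: state = (daysToFuture, minCaseDiff)
      let st := (PySem.List.pyRange (i + 1) (Input.length : Int) 1).foldl
        (fun (st : Int × Int) j =>
          if pvVal (pvRow Input j) < pvVal (pvRow Input i) ∧
              pvVal (pvRow Input i) - pvVal (pvRow Input j) < st.2 then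
            (pvDay (pvRow Input j) - pvDay (pvRow Input i),
             pvVal (pvRow Input i) - pvVal (pvRow Input j))
          else st)
        ((0 : Int), (10000000000000 : Int))
      PySem.List.pySetD ans i st.1)
    ans

-- ===== PORT B =====
def daysToFuture_alt (Input : List (List Int)) : List Int :=
  let st₀ : List Int × List Int × PySem.Dict Int Int :=
    (List.replicate Input.length 0, [], PySem.Dict.empty)
  -- state = (ans, vals, day): sweep i = n-2 .. 0
  let res := (PySem.List.pyRange ((Input.length : Int) - 2) (-1) (-1)).foldl
    (fun (st : List Int × List Int × PySem.Dict Int Int) i =>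
      let dj := pvDay (pvRow Input (i + 1))
      let vj := pvVal (pvRow Input (i + 1))
      let vals := if st.2.2.contains vj then st.2.1
                  else PySem.List.insert st.2.1 ((PySem.List.bisectRight st.2.1 vj : Nat) : Int) vj
      let day := st.2.2.insert vj dj
      let k := PySem.List.bisectLeft vals (pvVal (pvRow Input i))
      let ans := if k ≠ 0 then
          PySem.List.pySetD st.1 i
            (day.getD (PySem.List.pyGetD vals ((k : Int) - 1) 0) 0 - pvDay (pvRow Input i))
        else st.1
      (ans, vals, day))
    st₀
  res.1

-- ===== PRECONDITION & SPEC =====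
-- Pre_ excludes exactly the inputs where Python A raises IndexError: with ≥ 2 rows, every row's
-- indices 0 and 1 are read, so some row shorter than 2 makes A raise.
def Pre_daysToFuture (Input : List (List Int)) : Prop :=
  Input.length ≤ 1 ∨ ∀ r ∈ Input, 2 ≤ r.length
instance (Input : List (List Int)) : Decidable (Pre_daysToFuture Input) := by
  unfold Pre_daysToFuture; infer_instance
def pvWitness_daysToFuture : List (List Int) := [[0, 3], [2, 1], [5, 2]]

def Spec_daysToFuture (Input : List (List Int)) (out : List Int) : Prop := out = daysToFuture_alt Input
instance (Input : List (List Int)) (out : List Int) : Decidable (Spec_daysToFuture Input out) := by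
  unfold Spec_daysToFuture; infer_instance

-- ===== CLAIM (what is proved, stated in full; the proofs are below) =====
def Claim_equal_daysToFuture : Prop := ∀ (Input : List (List Int)), Dom_daysToFuture Input → Pre_daysToFuture Input → Spec_daysToFuture Input (daysToFuture Input)

-- ===== LEMMAS AND PROOFS =====


def pvBnd (x : Int) : Prop := -2147483648 ≤ x ∧ x ≤ 2147483648

def pvStep (v : Int) (o : Option (Int × Int)) (r : List Int) : Option (Int × Int) :=
  match o with
  | none => if pvVal r < v then some (pvVal r, pvDay r) else none
  | some q => if pvVal r < v ∧ q.1 < pvVal r then some (pvVal r, pvDay r) else some q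

def pvBest (v : Int) (t : List (List Int)) : Option (Int × Int) := t.foldl (pvStep v) none

def pvFirstDay (m : Int) (t : List (List Int)) : Int :=
  ((t.find? (fun r => pvVal r == m)).map pvDay).getD 0

-- characterisation of pvBest, by reverse induction
theorem pvBest_spec (v : Int) (t : List (List Int)) :
    (pvBest v t = none ∧ ∀ r ∈ t, ¬ pvVal r < v) ∨
    (∃ m, pvBest v t = some (m, pvFirstDay m t) ∧ m < v ∧ m ∈ t.map pvVal ∧
      ∀ r ∈ t, pvVal r < v → pvVal r ≤ m) := by
  induction t using List.reverseRecOn with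
  | nil => left; exact ⟨rfl, by simp⟩
  | append_singleton t r ih =>
    have hfold : pvBest v (t ++ [r]) = pvStep v (pvBest v t) r := by
      simp [pvBest, List.foldl_append]
    rcases ih with ⟨hb, hnone⟩ | ⟨m, hb, hmv, hmem, hmax⟩
    · by_cases hr : pvVal r < v
      · right
        refine ⟨pvVal r, ?_, hr, by simp, ?_⟩
        · rw [hfold, hb]
          have hfind : t.find? (fun s => pvVal s == pvVal r) = none := by
            rw [List.find?_eq_none]
            intro s hs
            simp only [beq_iff_eq]
            intro he
            exact hnone s hs (he ▸ hr)
          simp [pvStep, hr, pvFirstDay, List.find?_append, hfind]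
        · intro s hs hsv
          rcases List.mem_append.mp hs with h | h
          · exact absurd hsv (hnone s h)
          · simp only [List.mem_singleton] at h; subst h; exact le_refl _
      · left
        constructor
        · rw [hfold, hb]; simp [pvStep, hr]
        · intro s hs
          rcases List.mem_append.mp hs with h | h
          · exact hnone s h
          · simp only [List.mem_singleton] at h; subst h; exact hr
    · right
      have hmem' : ∃ s ∈ t, pvVal s = m := by
        rcases List.mem_map.mp hmem with ⟨s, hs, he⟩; exact ⟨s, hs, he⟩
      by_cases hnew : pvVal r < v ∧ m < pvVal r
      · -- r becomes the new best; its value cannot occur in t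
        refine ⟨pvVal r, ?_, hnew.1, by simp, ?_⟩
        · rw [hfold, hb]
          have hfind : t.find? (fun s => pvVal s == pvVal r) = none := by
            rw [List.find?_eq_none]
            intro s hs
            simp only [beq_iff_eq]
            intro he
            have := hmax s hs (he ▸ hnew.1)
            omega
          simp [pvStep, hnew, pvFirstDay, List.find?_append, hfind]
        · intro s hs hsv
          rcases List.mem_append.mp hs with h | h
          · have := hmax s h hsv; omega
          · simp only [List.mem_singleton] at h; subst h; exact le_refl _
      · -- best unchanged
        refine ⟨m, ?_, hmv, by simp [hmem], ?_⟩
        · rw [hfold, hb]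
          have hfind : (t.find? (fun s => pvVal s == m)).isSome := by
            rcases hmem' with ⟨s, hs, he⟩
            exact List.find?_isSome.mpr ⟨s, hs, by simp [he]⟩
          have : pvFirstDay m (t ++ [r]) = pvFirstDay m t := by
            unfold pvFirstDay
            rw [List.find?_append]
            rcases Option.isSome_iff_exists.mp hfind with ⟨s, hsome⟩
            rw [hsome]; rfl
          rw [this]
          simp [pvStep, hnew]
        · intro s hs hsv
          rcases List.mem_append.mp hs with h | h
          · exact hmax s h hsv
          · simp only [List.mem_singleton] at h; subst h
            by_contra hlt
            exact hnew ⟨hsv, by omega⟩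

-- relation between A's (daysToFuture, minCaseDiff) state and the Option state of pvStep
def pvRel (v d : Int) (o : Option (Int × Int)) (s : Int × Int) : Prop :=
  match o with
  | none => s = (0, 10000000000000)
  | some q => s = (q.2 - d, v - q.1) ∧ q.1 < v

theorem pvFoldA_rel (v d : Int) (hv : pvBnd v) :
    ∀ (t : List (List Int)), (∀ r ∈ t, pvBnd (pvVal r)) →
    ∀ (o : Option (Int × Int)) (s : Int × Int), pvRel v d o s →
    pvRel v d (t.foldl (pvStep v) o)
      (t.foldl (fun (st : Int × Int) r =>
        if pvVal r < v ∧ v - pvVal r < st.2 then (pvDay r - d, v - pvVal r) else st) s) := by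
  intro t
  induction t with
  | nil => intro _ o s h; exact h
  | cons r t ih =>
    intro hb o s h
    simp only [List.foldl_cons]
    apply ih (fun x hx => hb x (List.mem_cons_of_mem _ hx))
    match o with
    | none =>
      simp only [pvRel] at h
      subst h
      by_cases hr : pvVal r < v
      · have hbr := hb r List.mem_cons_self
        have hcond : pvVal r < v ∧ v - pvVal r < 10000000000000 := by
          unfold pvBnd at hv hbr; constructor; exact hr; omega
        simp only [pvStep, if_pos hr, if_pos hcond, pvRel]
        exact ⟨trivial, hr⟩
      · have hcond : ¬ (pvVal r < v ∧ v - pvVal r < (10000000000000 : Int)) := by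
          intro h; exact hr h.1
        simp only [pvStep, if_neg hr, if_neg hcond, pvRel]
    | some q =>
      obtain ⟨hs, hqv⟩ := h
      subst hs
      by_cases hr : pvVal r < v ∧ q.1 < pvVal r
      · have hcond : pvVal r < v ∧ v - pvVal r < v - q.1 := ⟨hr.1, by omega⟩
        simp only [pvStep, if_pos hr, if_pos hcond, pvRel]
        exact ⟨trivial, hr.1⟩
      · have hcond : ¬ (pvVal r < v ∧ v - pvVal r < v - q.1) := by
          intro h; exact hr ⟨h.1, by omega⟩
        simp only [pvStep, if_neg hr, if_neg hcond, pvRel]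
        exact ⟨trivial, hqv⟩

-- A's inner loop result, in terms of pvBest
theorem pvInnerA (v d : Int) (hv : pvBnd v) (t : List (List Int))
    (hb : ∀ r ∈ t, pvBnd (pvVal r)) :
    (t.foldl (fun (st : Int × Int) r =>
        if pvVal r < v ∧ v - pvVal r < st.2 then (pvDay r - d, v - pvVal r) else st)
      ((0 : Int), (10000000000000 : Int))).1 =
    (match pvBest v t with
     | none => 0
     | some q => q.2 - d) := by
  have := pvFoldA_rel v d hv t hb none ((0 : Int), (10000000000000 : Int)) rfl
  rw [show t.foldl (pvStep v) none = pvBest v t from rfl] at this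
  match hc : pvBest v t with
  | none => rw [hc] at this; simp only [pvRel] at this; rw [this]
  | some q => rw [hc] at this; obtain ⟨hs, _⟩ := this; rw [hs]

-- inserting a fresh value at bisectRight keeps the list strictly sorted; membership adds x
theorem pvInsort_pairwise (vals : List Int) (hs : vals.Pairwise (· < ·)) (x : Int)
    (hx : x ∉ vals) :
    (PySem.List.insert vals ((PySem.List.bisectRight vals x : Nat) : Int) x).Pairwise (· < ·) ∧
    (∀ y : Int, y ∈ PySem.List.insert vals ((PySem.List.bisectRight vals x : Nat) : Int) x ↔
      y = x ∨ y ∈ vals) := by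
  have hle : vals.Pairwise (· ≤ ·) := hs.imp (fun h => le_of_lt h)
  obtain ⟨hk, hlo, hhi⟩ := PySem.List.bisectRight_spec vals x hle
  rw [PySem.List.insert_natCast vals _ x hk]
  set k := PySem.List.bisectRight vals x with hkdef
  constructor
  · rw [List.pairwise_append]
    refine ⟨hs.sublist (List.take_sublist _ _), ?_, ?_⟩
    · rw [List.pairwise_cons]
      refine ⟨?_, hs.sublist (List.drop_sublist _ _)⟩
      intro b hb
      rcases List.mem_iff_getElem.mp hb with ⟨j, hj, he⟩
      rw [List.getElem_drop] at he
      have := hhi (k + j) (by simp at hj; omega) (by omega)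
      omega
    · intro a ha b hb
      rcases List.mem_iff_getElem.mp ha with ⟨i, hi, hea⟩
      rw [List.getElem_take] at hea
      have hik : i < k := lt_of_lt_of_le hi (by simp)
      have hiv : i < vals.length := lt_of_lt_of_le hik hk
      have hax : a ≤ x := hea ▸ hlo i hiv hik
      have hax' : a < x := lt_of_le_of_ne hax (by rintro rfl; exact hx (hea ▸ List.getElem_mem hiv))
      rcases List.mem_cons.mp hb with rfl | hb
      · exact hax'
      · rcases List.mem_iff_getElem.mp hb with ⟨j, hj, heb⟩
        rw [List.getElem_drop] at heb
        have hxb := hhi (k + j) (by simp at hj; omega) (by omega)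
        omega
  · intro y
    constructor
    · intro hy
      rcases List.mem_append.mp hy with h | h
      · exact Or.inr (List.mem_of_mem_take h)
      · rcases List.mem_cons.mp h with rfl | h
        · exact Or.inl rfl
        · exact Or.inr (List.mem_of_mem_drop h)
    · intro hy
      rcases hy with rfl | hy
      · exact List.mem_append.mpr (Or.inr List.mem_cons_self)
      · have := List.take_append_drop k vals
        rw [← this] at hy
        rcases List.mem_append.mp hy with h | h
        · exact List.mem_append.mpr (Or.inl h)
        · exact List.mem_append.mpr (Or.inr (List.mem_cons_of_mem _ h))

-- the sweep invariant: vals is the strictly sorted list of values of t,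
-- day answers membership and maps each value to the day of its first occurrence in t
def pvInv (t : List (List Int)) (vals : List Int) (day : PySem.Dict Int Int) : Prop :=
  vals.Pairwise (· < ·) ∧
  (∀ x : Int, x ∈ vals ↔ x ∈ t.map pvVal) ∧
  (∀ x : Int, day.contains x = true ↔ x ∈ t.map pvVal) ∧
  (∀ x ∈ vals, day.getD x 0 = pvFirstDay x t)

theorem pvInv_nil : pvInv [] [] PySem.Dict.empty := by
  refine ⟨List.Pairwise.nil, by simp, ?_, by simp⟩
  intro x
  simp [PySem.Dict.contains_empty]

theorem pvInv_cons (t : List (List Int)) (vals : List Int) (day : PySem.Dict Int Int)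
    (h : pvInv t vals day) (r : List Int) :
    pvInv (r :: t)
      (if day.contains (pvVal r) then vals
       else PySem.List.insert vals ((PySem.List.bisectRight vals (pvVal r) : Nat) : Int) (pvVal r))
      (day.insert (pvVal r) (pvDay r)) := by
  obtain ⟨hsorted, hmem, hcont, hday⟩ := h
  have hmem' : ∀ y : Int,
      (y ∈ (if day.contains (pvVal r) then vals
        else PySem.List.insert vals ((PySem.List.bisectRight vals (pvVal r) : Nat) : Int) (pvVal r)))
      ↔ y = pvVal r ∨ y ∈ vals := by
    intro y
    by_cases hc : day.contains (pvVal r)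
    · rw [if_pos hc]
      have hin : pvVal r ∈ vals := (hmem _).mpr ((hcont _).mp hc)
      constructor
      · exact Or.inr
      · rintro (rfl | hy)
        · exact hin
        · assumption
    · rw [if_neg hc]
      have hnin : pvVal r ∉ vals := fun hin =>
        hc ((hcont _).mpr ((hmem _).mp hin))
      exact (pvInsort_pairwise vals hsorted (pvVal r) hnin).2 y
  refine ⟨?_, ?_, ?_, ?_⟩
  · by_cases hc : day.contains (pvVal r)
    · rw [if_pos hc]; exact hsorted
    · rw [if_neg hc]
      have hnin : pvVal r ∉ vals := fun hin => hc ((hcont _).mpr ((hmem _).mp hin))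
      exact (pvInsort_pairwise vals hsorted (pvVal r) hnin).1
  · intro x
    rw [hmem' x, hmem x]
    simp [List.mem_cons, eq_comm]
  · intro x
    rw [PySem.Dict.contains_insert]
    simp only [List.map_cons, List.mem_cons, Bool.or_eq_true, beq_iff_eq, hcont x]
  · intro x hx
    rw [PySem.Dict.getD_insert]
    by_cases hxr : x = pvVal r
    · rw [if_pos hxr]
      unfold pvFirstDay
      rw [List.find?_cons_of_pos (by simp [hxr])]
      rfl
    · rw [if_neg hxr]
      have hxv : x ∈ vals := by
        rcases (hmem' x).mp hx with h | h
        · exact absurd h hxr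
        · exact h
      rw [hday x hxv]
      unfold pvFirstDay
      rw [List.find?_cons_of_neg (by simp; exact fun h => hxr h.symm)]

-- the predecessor query answers pvBest
theorem pvQuery (t : List (List Int)) (vals : List Int) (day : PySem.Dict Int Int)
    (h : pvInv t vals day) (v : Int) :
    (PySem.List.bisectLeft vals v = 0 → pvBest v t = none) ∧
    (PySem.List.bisectLeft vals v ≠ 0 →
      pvBest v t = some (PySem.List.pyGetD vals (((PySem.List.bisectLeft vals v) : Int) - 1) 0,
        day.getD (PySem.List.pyGetD vals (((PySem.List.bisectLeft vals v) : Int) - 1) 0) 0)) := by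
  obtain ⟨hsorted, hmem, hcont, hday⟩ := h
  have hle : vals.Pairwise (· ≤ ·) := hsorted.imp (fun h => le_of_lt h)
  obtain ⟨hk, hlo, hhi⟩ := PySem.List.bisectLeft_spec vals v hle
  set k := PySem.List.bisectLeft vals v with hkdef
  rcases pvBest_spec v t with ⟨hb, hnone⟩ | ⟨m, hb, hmv, hmm, hmax⟩
  · constructor
    · intro _; exact hb
    · intro hk0
      exfalso
      have hk1 : k - 1 < vals.length := by omega
      have : vals[k-1] < v := hlo (k - 1) hk1 (by omega)
      have hin : vals[k-1] ∈ t.map pvVal := (hmem _).mp (List.getElem_mem hk1)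
      rcases List.mem_map.mp hin with ⟨s, hs, he⟩
      exact hnone s hs (by omega)
  · -- some case: k ≠ 0 and vals[k-1] = m
    have hmvals : m ∈ vals := (hmem m).mpr hmm
    rcases List.mem_iff_getElem.mp hmvals with ⟨jm, hjm, hjme⟩
    have hjmk : jm < k := by
      by_contra hh
      have := hhi jm hjm (by omega)
      omega
    have hk0 : k ≠ 0 := by omega
    have hk1 : k - 1 < vals.length := by omega
    have hklt : vals[k-1] < v := hlo (k - 1) hk1 (by omega)
    have hmle : m ≤ vals[k-1] := by
      rcases Nat.lt_or_ge jm (k - 1) with hj | hj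
      · have := List.pairwise_iff_getElem.mp hsorted jm (k-1) hjm hk1 hj
        omega
      · have : jm = k - 1 := by omega
        subst this; omega
    have hge : vals[k-1] ≤ m := by
      have hin : vals[k-1] ∈ t.map pvVal := (hmem _).mp (List.getElem_mem hk1)
      rcases List.mem_map.mp hin with ⟨s, hs, he⟩
      rw [← he]; exact hmax s hs (by omega)
    have heq : vals[k-1] = m := le_antisymm hge hmle
    have hgetD : PySem.List.pyGetD vals ((k : Int) - 1) 0 = m := by
      have : ((k : Int) - 1) = ((k - 1 : Nat) : Int) := by omega
      rw [this, PySem.List.pyGetD_natCast, List.getD_eq_getElem vals 0 hk1, heq]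
    constructor
    · intro h0; exact absurd h0 hk0
    · intro _
      rw [hgetD, hb, hday m ((hmem m).mpr hmm)]

-- the value A writes at index k (and, as proved later, B too)
def pvF (Input : List (List Int)) (k : Nat) : Int :=
  match pvBest (pvVal (pvRow Input (k : Int))) (Input.drop (k + 1)) with
  | none => 0
  | some q => q.2 - pvDay (pvRow Input (k : Int))

-- a fold of indexed writes over range(m), elementwise
theorem pvSetFold (F : Int → Int) : ∀ (m : Nat) (ans : List Int), m ≤ ans.length →
    (((PySem.List.pyRange 0 (m : Int) 1).foldl
        (fun a i => PySem.List.pySetD a i (F i)) ans).length = ans.length) ∧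
    ∀ (k : Nat) (d : Int),
      ((PySem.List.pyRange 0 (m : Int) 1).foldl
        (fun a i => PySem.List.pySetD a i (F i)) ans).getD k d =
      if k < m then F k else ans.getD k d := by
  intro m
  induction m with
  | zero =>
    intro ans _
    rw [show ((0 : Nat) : Int) = 0 by rfl, PySem.List.pyRange_one_eq_nil (le_refl 0)]
    simp
  | succ m ih =>
    intro ans hm
    have hcast : ((m + 1 : Nat) : Int) = (m : Int) + 1 := by push_cast; ring
    rw [hcast, PySem.List.pyRange_one_succ_right (by positivity), List.foldl_append]
    obtain ⟨ihlen, ihget⟩ := ih ans (by omega)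
    simp only [List.foldl_cons, List.foldl_nil]
    rw [PySem.List.pySetD_natCast]
    constructor
    · rw [List.length_set, ihlen]
    · intro k d
      rw [List.getD_eq_getElem?_getD, List.getElem?_set]
      by_cases hk : m = k
      · subst hk
        rw [if_pos rfl, if_pos (by rw [ihlen]; omega)]
        simp only [Option.getD_some]
        rw [if_pos (by omega)]
      · rw [if_neg hk, ← List.getD_eq_getElem?_getD, ihget k d]
        by_cases hk2 : k < m
        · rw [if_pos hk2, if_pos (by omega)]
        · rw [if_neg hk2, if_neg (by omega)]



-- bounds from the domain
theorem pvBnd_of_dom (Input : List (List Int)) (hDom : Dom_daysToFuture Input)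
    (r : List Int) (hr : r ∈ Input) (hlen : 2 ≤ r.length) : pvBnd (pvVal r) := by
  unfold Dom_daysToFuture at hDom
  rw [List.all_eq_true] at hDom
  have hrow := hDom r hr
  rw [List.all_eq_true] at hrow
  have h1 : r.getD 1 0 = r[1]'(by omega) := List.getD_eq_getElem r 0 (by omega)
  have hmem : r[1]'(by omega) ∈ r := List.getElem_mem _
  have := hrow _ hmem
  unfold pvDomInt at this
  simp only [decide_eq_true_eq] at this
  unfold pvVal pvBnd
  rw [PySem.List.pyGetD_ofNat', h1]
  exact this

theorem pvRow_eq (Input : List (List Int)) (i : Nat) (h : i < Input.length) :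
    pvRow Input (i : Int) = Input[i] := by
  unfold pvRow
  rw [PySem.List.pyGetD_natCast, List.getD_eq_getElem Input [] h]

-- A computes pvF at every index below n-1, and 0 elsewhere
theorem pvA_char (Input : List (List Int)) (hDom : Dom_daysToFuture Input)
    (hrows : ∀ r ∈ Input, 2 ≤ r.length) (hn : 1 ≤ Input.length) :
    (daysToFuture Input).length = Input.length ∧
    ∀ k : Nat, (daysToFuture Input).getD k 0 =
      if k < Input.length - 1 then pvF Input k else 0 := by
  unfold daysToFuture
  have hcast : (Input.length : Int) - 1 = ((Input.length - 1 : Nat) : Int) := by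
    push_cast [hn]; omega
  rw [hcast]
  obtain ⟨hlen, hget⟩ := pvSetFold
    (fun i => ((PySem.List.pyRange (i + 1) (Input.length : Int) 1).foldl
        (fun (st : Int × Int) j =>
          if pvVal (pvRow Input j) < pvVal (pvRow Input i) ∧
              pvVal (pvRow Input i) - pvVal (pvRow Input j) < st.2 then
            (pvDay (pvRow Input j) - pvDay (pvRow Input i),
             pvVal (pvRow Input i) - pvVal (pvRow Input j))
          else st)
        ((0 : Int), (10000000000000 : Int))).1)
    (Input.length - 1) (List.replicate Input.length (0 : Int)) (by simp)
  refine ⟨by rw [hlen]; simp, ?_⟩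
  intro k
  rw [hget k 0]
  by_cases hk : k < Input.length - 1
  · rw [if_pos hk, if_pos hk]
    -- the inner loop over j equals pvBest on the dropped suffix
    have hk1 : k < Input.length := by omega
    have hrowk := pvRow_eq Input k hk1
    have hv : pvBnd (pvVal (pvRow Input (k : Int))) := by
      rw [hrowk]
      exact pvBnd_of_dom Input hDom _ (List.getElem_mem hk1) (hrows _ (List.getElem_mem hk1))
    have hconv : ((k : Int) + 1) = ((k + 1 : Nat) : Int) := by push_cast; ring
    simp only [pvRow] at *
    rw [hconv, PySem.List.foldl_pyRange_pyGetD' Input []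
      (fun (st : Int × Int) r =>
        if pvVal r < pvVal (PySem.List.pyGetD Input (k : Int) []) ∧
            pvVal (PySem.List.pyGetD Input (k : Int) []) - pvVal r < st.2 then
          (pvDay r - pvDay (PySem.List.pyGetD Input (k : Int) []),
           pvVal (PySem.List.pyGetD Input (k : Int) []) - pvVal r)
        else st)
      ((0 : Int), (10000000000000 : Int)) (by positivity)]
    have htoNat : ((k + 1 : Nat) : Int).toNat = k + 1 := by omega
    rw [htoNat]
    have hb : ∀ r ∈ Input.drop (k + 1), pvBnd (pvVal r) := by
      intro r hr
      have hr' : r ∈ Input := List.mem_of_mem_drop hr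
      exact pvBnd_of_dom Input hDom r hr' (hrows r hr')
    rw [pvInnerA _ _ hv _ hb]
    rfl
  · rw [if_neg hk, if_neg hk]
    simp [List.getD]


-- B's sweep, by downward induction: running from index c-1 down to 0 fills every
-- position below n-1 with pvF
theorem pvB_loop (Input : List (List Int)) (hn : 2 ≤ Input.length) :
    ∀ (c : Nat), c ≤ Input.length - 1 →
    ∀ (ans vals : List Int) (day : PySem.Dict Int Int),
    pvInv (Input.drop (c + 1)) vals day →
    ans.length = Input.length →
    (∀ k : Nat, k < Input.length → ans.getD k 0 =
      if c ≤ k ∧ (k : Int) ≤ (Input.length : Int) - 2 then pvF Input k else 0) →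
    (((PySem.List.pyRange ((c : Int) - 1) (-1) (-1)).foldl
        (fun (st : List Int × List Int × PySem.Dict Int Int) i =>
          let dj := pvDay (pvRow Input (i + 1))
          let vj := pvVal (pvRow Input (i + 1))
          let vals := if st.2.2.contains vj then st.2.1
                      else PySem.List.insert st.2.1 ((PySem.List.bisectRight st.2.1 vj : Nat) : Int) vj
          let day := st.2.2.insert vj dj
          let k := PySem.List.bisectLeft vals (pvVal (pvRow Input i))
          let ans := if k ≠ 0 then
              PySem.List.pySetD st.1 i
                (day.getD (PySem.List.pyGetD vals ((k : Int) - 1) 0) 0 - pvDay (pvRow Input i))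
            else st.1
          (ans, vals, day))
        (ans, vals, day)).1.length = Input.length) ∧
    (∀ k : Nat, k < Input.length →
      ((PySem.List.pyRange ((c : Int) - 1) (-1) (-1)).foldl
        (fun (st : List Int × List Int × PySem.Dict Int Int) i =>
          let dj := pvDay (pvRow Input (i + 1))
          let vj := pvVal (pvRow Input (i + 1))
          let vals := if st.2.2.contains vj then st.2.1
                      else PySem.List.insert st.2.1 ((PySem.List.bisectRight st.2.1 vj : Nat) : Int) vj
          let day := st.2.2.insert vj dj
          let k := PySem.List.bisectLeft vals (pvVal (pvRow Input i))
          let ans := if k ≠ 0 then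
              PySem.List.pySetD st.1 i
                (day.getD (PySem.List.pyGetD vals ((k : Int) - 1) 0) 0 - pvDay (pvRow Input i))
            else st.1
          (ans, vals, day))
        (ans, vals, day)).1.getD k 0 =
      if (k : Int) ≤ (Input.length : Int) - 2 then pvF Input k else 0) := by
  intro c
  induction c with
  | zero =>
    intro _ ans vals day _ hlen hans
    rw [show ((0 : Nat) : Int) - 1 = -1 by ring, PySem.List.pyRange_neg_one_eq_nil (le_refl _)]
    simp only [List.foldl_nil]
    refine ⟨hlen, ?_⟩
    intro k hk
    rw [hans k hk]
    simp
  | succ c ih =>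
    intro hc ans vals day hinv hlen hans
    have hcast : ((c + 1 : Nat) : Int) - 1 = (c : Int) := by push_cast; ring
    rw [hcast, PySem.List.pyRange_neg_one_cons (by omega), List.foldl_cons]
    have hc1 : c + 1 < Input.length := by omega
    have hcl : c < Input.length := by omega
    -- the stepped state, named
    set vj := pvVal (pvRow Input ((c : Int) + 1)) with hvj
    set dj := pvDay (pvRow Input ((c : Int) + 1)) with hdj
    set V := (if day.contains vj then vals
      else PySem.List.insert vals ((PySem.List.bisectRight vals vj : Nat) : Int) vj) with hV
    set D := day.insert vj dj with hD
    set k0 := PySem.List.bisectLeft V (pvVal (pvRow Input (c : Int))) with hk0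
    set A := (if k0 ≠ 0 then
        PySem.List.pySetD ans (c : Int)
          (D.getD (PySem.List.pyGetD V ((k0 : Int) - 1) 0) 0 - pvDay (pvRow Input (c : Int)))
      else ans) with hA
    -- invariant for the new state
    have hrow1 : pvRow Input ((c : Int) + 1) = Input[c + 1] := by
      rw [show (c : Int) + 1 = ((c + 1 : Nat) : Int) by push_cast; ring, pvRow_eq Input (c + 1) hc1]
    have hdropc : Input.drop (c + 1) = pvRow Input ((c : Int) + 1) :: Input.drop (c + 2) := by
      rw [hrow1]; exact List.drop_eq_getElem_cons hc1
    have hinv' : pvInv (Input.drop (c + 1)) V D := by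
      rw [hdropc]
      exact pvInv_cons (Input.drop (c + 2)) vals day hinv (pvRow Input ((c : Int) + 1))
    obtain ⟨hq0, hq1⟩ := pvQuery (Input.drop (c + 1)) V D hinv' (pvVal (pvRow Input (c : Int)))
    have hpvFc : pvF Input c =
        (if k0 ≠ 0 then
          D.getD (PySem.List.pyGetD V ((k0 : Int) - 1) 0) 0 - pvDay (pvRow Input (c : Int))
        else 0) := by
      by_cases h0 : k0 = 0
      · rw [if_neg (by simp [h0])]
        unfold pvF
        rw [hq0 h0]
      · rw [if_pos h0]
        unfold pvF
        rw [hq1 h0]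
    have hlenA : A.length = Input.length := by
      rw [hA]
      by_cases h0 : k0 = 0
      · rw [if_neg (by simp [h0])]; exact hlen
      · rw [if_pos h0, PySem.List.length_pySetD]; exact hlen
    have hansA : ∀ k : Nat, k < Input.length → A.getD k 0 =
        if c ≤ k ∧ (k : Int) ≤ (Input.length : Int) - 2 then pvF Input k else 0 := by
      intro k hk
      by_cases h0 : k0 = 0
      · rw [hA, if_neg (by simp [h0]), hans k hk]
        by_cases hkc : k = c
        · subst hkc
          rw [if_neg (by omega), if_pos ⟨le_refl _, by omega⟩, hpvFc, if_neg (by simp [h0])]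
        · by_cases hcond : c + 1 ≤ k ∧ (k : Int) ≤ (Input.length : Int) - 2
          · rw [if_pos hcond, if_pos ⟨by omega, hcond.2⟩]
          · rw [if_neg hcond, if_neg (by omega)]
      · rw [hA, if_pos h0, PySem.List.pySetD_natCast, List.getD_eq_getElem?_getD,
          List.getElem?_set]
        by_cases hkc : c = k
        · subst hkc
          rw [if_pos rfl, if_pos (by omega)]
          simp only [Option.getD_some]
          rw [if_pos ⟨le_refl _, by omega⟩, hpvFc, if_pos h0]
        · rw [if_neg hkc, ← List.getD_eq_getElem?_getD, hans k hk]
          by_cases hcond : c + 1 ≤ k ∧ (k : Int) ≤ (Input.length : Int) - 2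
          · rw [if_pos hcond, if_pos ⟨by omega, hcond.2⟩]
          · rw [if_neg hcond, if_neg (by omega)]
    exact ih (by omega) A V D hinv' hlenA hansA

-- ===== VERDICT (by name: the statement is the Claim_ definition above) =====
theorem daysToFuture_spec : Claim_equal_daysToFuture := by
  intro Input hDom hPre
  unfold Spec_daysToFuture
  by_cases hn : Input.length ≤ 1
  · -- at most one row: both loops are empty and return the all-zero list
    unfold daysToFuture daysToFuture_alt
    rw [PySem.List.pyRange_one_eq_nil (by omega : (Input.length : Int) - 1 ≤ 0),
      PySem.List.pyRange_neg_one_eq_nil (by omega : (Input.length : Int) - 2 ≤ -1)]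
    rfl
  · have hn2 : 2 ≤ Input.length := by omega
    have hrows : ∀ r ∈ Input, 2 ≤ r.length := by
      rcases hPre with h | h
      · omega
      · exact h
    obtain ⟨hAlen, hAget⟩ := pvA_char Input hDom hrows (by omega)
    have hinv0 : pvInv (Input.drop ((Input.length - 1) + 1)) [] PySem.Dict.empty := by
      rw [show (Input.length - 1) + 1 = Input.length by omega, List.drop_length]
      exact pvInv_nil
    obtain ⟨hBlen, hBget⟩ := pvB_loop Input hn2 (Input.length - 1) (le_refl _)
      (List.replicate Input.length 0) [] PySem.Dict.empty hinv0 (by simp)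
      (by
        intro k hk
        rw [if_neg (by omega)]
        simp [List.getD_eq_getElem?_getD])
    rw [show (((Input.length - 1 : Nat) : Int) - 1) = (Input.length : Int) - 2 from by omega]
      at hBlen hBget
    apply List.ext_getElem
    · rw [hAlen]
      unfold daysToFuture_alt
      rw [hBlen]
    · intro i h1 h2
      rw [← List.getD_eq_getElem _ 0 h1, ← List.getD_eq_getElem _ 0 h2, hAget i]
      have h2' : i < Input.length := by
        unfold daysToFuture_alt at h2
        rw [hBlen] at h2
        exact h2
      show _ = (daysToFuture_alt Input).getD i 0
      unfold daysToFuture_alt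
      rw [hBget i h2']
      by_cases hi : i < Input.length - 1
      · rw [if_pos hi, if_pos (by omega)]
      · rw [if_neg hi, if_neg (by omega)]
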